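-- pv_equiv track=rewrite | github.com/saromanov/todoprogress | util.py | tasknameToPretty
-- ===== SOURCE A (Python) =====
-- def tasknameToPretty(taskname):
-- 	""" From task name input to pretty format """
-- 	if len(taskname) == 0:
-- 		return []
-- 	dropSymbols = ['.',':',',','+','-','!','?']
-- 	result = taskname.lower().split()
-- 	def drops(data):
-- 		for symbol in dropSymbols:
-- 			if symbol in data:
-- 				data = data.replace(symbol,'')
-- 		return data
-- 	return list(map(lambda x: drops(x), result))
-- ===== SOURCE B (Python) =====
-- def tasknameToPretty(taskname):
--     """ From task name input to pretty format """
--     drop = {'.', ':', ',', '+', '-', '!', '?'}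
--     return [''.join(c for c in tok if c not in drop)
--             for tok in taskname.lower().split()]
-- ===== Notes on version B (the rewrite author's own statement) =====
-- stated objective: simpler
-- what changed: Instead of guarding on empty input and running up to seven membership-test-plus-replace scans per token, B cleans each token in a single character pass that filters out characters belonging to the drop set.
import Mathlib
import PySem

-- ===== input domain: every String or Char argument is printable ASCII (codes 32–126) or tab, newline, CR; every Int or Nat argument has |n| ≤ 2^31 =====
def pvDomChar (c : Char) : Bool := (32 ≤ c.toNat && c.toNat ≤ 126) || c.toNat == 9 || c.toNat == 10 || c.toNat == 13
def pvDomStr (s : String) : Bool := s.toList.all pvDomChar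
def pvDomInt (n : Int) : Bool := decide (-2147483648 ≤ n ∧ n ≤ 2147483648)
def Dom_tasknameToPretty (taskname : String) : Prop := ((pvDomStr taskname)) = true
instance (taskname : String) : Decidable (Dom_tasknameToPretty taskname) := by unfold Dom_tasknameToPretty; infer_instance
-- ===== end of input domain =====

-- B replaces A's empty-input guard and per-symbol replace loop by a single
-- character-filter pass per token (objective: simpler).


-- ===== PORT A =====
def dropSymbolsA : List String := [".", ":", ",", "+", "-", "!", "?"]

-- A's inner 'drops': for each symbol, if it occurs in the token, replace it by ''
def dropsA (data : String) : String :=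
  dropSymbolsA.foldl
    (fun d symbol => if PySem.Str.isIn symbol d then PySem.Str.replace d symbol "" else d)
    data

def tasknameToPretty (taskname : String) : List String :=
  if PySem.Str.len taskname = 0 then []
  else (PySem.Str.split₀ (PySem.Str.lower taskname)).map (fun x => dropsA x)

-- ===== PORT B =====
def pvDropSet : List Char := ['.', ':', ',', '+', '-', '!', '?']

-- B's per-token single pass: keep only characters not in the drop set
def cleanTok (tok : String) : String :=
  String.ofList (tok.toList.filter (fun c => !pvDropSet.contains c))

def tasknameToPretty_alt (taskname : String) : List String :=
  (PySem.Str.split₀ (PySem.Str.lower taskname)).map cleanTok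

-- ===== PRECONDITION & SPEC =====
def Spec_tasknameToPretty (taskname : String) (out : List String) : Prop := out = tasknameToPretty_alt taskname
instance (taskname : String) (out : List String) : Decidable (Spec_tasknameToPretty taskname out) := by unfold Spec_tasknameToPretty; infer_instance

-- ===== CLAIM (what is proved, stated in full; the proofs are below) =====
def Claim_equal_tasknameToPretty : Prop := ∀ (taskname : String), Dom_tasknameToPretty taskname → Spec_tasknameToPretty taskname (tasknameToPretty taskname)

-- ===== LEMMAS AND PROOFS =====

-- replace.go with a single-char pattern and empty replacement is a filter
lemma go_singleton (c : Char) : ∀ (fuel : Nat) (l acc : List Char), l.length ≤ fuel →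
    PySem.Chars.replace.go [c] [] fuel l acc = acc.reverse ++ l.filter (· ≠ c) := by
  intro fuel
  induction fuel with
  | zero => intro l acc h; rw [List.length_eq_zero_iff.mp (Nat.le_zero.mp h)]
            simp [PySem.Chars.replace.go]
  | succ n ih =>
    intro l acc h
    cases l with
    | nil => simp [PySem.Chars.replace.go]
    | cons x t =>
      simp only [List.length_cons, Nat.succ_le_succ_iff] at h
      by_cases hx : x = c
      · subst hx
        rw [PySem.Chars.replace.go]
        simp only [List.isPrefixOf, BEq.rfl, Bool.true_and,
          if_true, List.length_singleton, List.drop_one, List.tail_cons, List.reverse_nil,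
          List.nil_append]
        rw [ih t acc h]
        simp
      · rw [PySem.Chars.replace.go]
        have : List.isPrefixOf [c] (x :: t) = false := by
          simp [List.isPrefixOf]; exact fun hc => absurd hc.symm hx
        rw [this]
        simp only [Bool.false_eq_true, if_false]
        rw [ih t (x :: acc) h]
        simp [hx]

lemma replace_singleton (c : Char) (l : List Char) :
    PySem.Chars.replace l [c] [] = l.filter (· ≠ c) := by
  rw [PySem.Chars.replace]
  simp only [List.isEmpty_cons, Bool.false_eq_true, if_false]
  rw [go_singleton c l.length l [] le_rfl]
  simp

-- one iteration of A's symbol loop, on the char-list side: a filter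
lemma stepA_toList (c : Char) (d : String) :
    (if PySem.Str.isIn (String.ofList [c]) d then PySem.Str.replace d (String.ofList [c]) "" else d).toList
      = d.toList.filter (· ≠ c) := by
  by_cases h : PySem.Str.isIn (String.ofList [c]) d = true
  · rw [if_pos h, PySem.Str.toList_replace]
    rw [String.toList_ofList, show ("" : String).toList = [] from String.toList_empty,
        replace_singleton]
  · rw [if_neg h]
    have h' : PySem.Chars.isIn [c] d.toList = false := by
      have := PySem.Str.isIn_eq (String.ofList [c]) d
      rw [String.toList_ofList] at this
      rw [← this]; exact Bool.not_eq_true _ ▸ (by simpa using h)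
    have hnin : c ∉ d.toList := by
      intro hc
      obtain ⟨pre, suf, hps⟩ := List.append_of_mem hc
      exact (PySem.Chars.isIn_eq_false_iff _ _).mp h' ⟨pre, suf, by rw [hps]; simp⟩
    symm
    exact List.filter_eq_self.mpr (fun a ha => by
      simp only [ne_eq, decide_eq_true_eq]
      intro hac; exact hnin (hac ▸ ha))

-- the whole 7-symbol loop equals B's single filter pass
lemma dropsA_eq_cleanTok (t : String) : dropsA t = cleanTok t := by
  apply String.toList_inj.mp
  show (dropsA t).toList = (cleanTok t).toList
  unfold dropsA dropSymbolsA
  simp only [List.foldl_cons, List.foldl_nil]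
  rw [show ("." : String) = String.ofList ['.'] by decide,
      show (":" : String) = String.ofList [':'] by decide,
      show ("," : String) = String.ofList [','] by decide,
      show ("+" : String) = String.ofList ['+'] by decide,
      show ("-" : String) = String.ofList ['-'] by decide,
      show ("!" : String) = String.ofList ['!'] by decide,
      show ("?" : String) = String.ofList ['?'] by decide]
  rw [stepA_toList '?', stepA_toList '!', stepA_toList '-', stepA_toList '+',
      stepA_toList ',', stepA_toList ':', stepA_toList '.']
  unfold cleanTok
  rw [String.toList_ofList]
  simp only [List.filter_filter]
  apply List.filter_congr
  intro a _
  simp only [pvDropSet, List.contains_cons, List.contains_nil, Bool.or_false, Bool.not_or,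
    ne_eq, decide_not, Bool.beq_eq_decide_eq]
  ac_rfl

-- ===== VERDICT (by name: the statement is the Claim_ definition above) =====
theorem tasknameToPretty_spec : Claim_equal_tasknameToPretty := by
  intro taskname _
  unfold Spec_tasknameToPretty tasknameToPretty tasknameToPretty_alt
  by_cases h : PySem.Str.len taskname = 0
  · rw [if_pos h]
    have hnil : taskname = "" := by
      rw [PySem.Str.len_eq] at h
      have : taskname.toList = [] := List.length_eq_zero_iff.mp (by exact_mod_cast h)
      exact String.toList_inj.mp (by simpa using this)
    subst hnil
    decide
  · rw [if_neg h]
    exact List.map_congr_left (fun t _ => dropsA_eq_cleanTok t)
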